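-- pv_equiv track=rewrite | github.com/tmu-nlp/100knock2018 | hotate/chapter05/knock49.py | extraction_path
-- ===== SOURCE A (Python) =====
-- def extraction_path(sentences):
--     result = []
--     for sentence in sentences:
--         for x_no, combi_x in enumerate(sentence):
--             for y_no in range(x_no+1, len(sentence)):
--                 combi_y = sentence[y_no]  # combi_yはcombi_xより後ろの係り受けパス
--                 path = []
--
--                 if combi_x[-1] == combi_y[-1]:  #　最後の文字が一致
--                     c = list(set(combi_x) & set(combi_y))  # ｘとｙの共通部分　積集合
--                     k = combi_x[-len(c):len(combi_x)]  # 後ろから数えて積集合の要素数分だけ抜き出す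
--                     i = combi_x[:-len(c)]  # 積集合を取り除いたもの
--                     j = combi_y[:-len(c)]
--
--                     if len(j) is 0:  # 共通の文節が存在しない場合
--                         i.append(k[0])
--                     path.append(i)
--
--                     if len(j) is not 0:  # 共通の文節が存在する場合
--                         path.append(j)
--                         path.append(k[:1])
--                     result.append(path)
--                 else:
--                     pass
--     return result
-- ===== SOURCE B (Python) =====
-- def _pair_path(combi_x, combi_y):
--     # identical per-pair output as computed from the two paths
--     c_len = len(set(combi_x) & set(combi_y))
--     i = combi_x[:-c_len]
--     j = combi_y[:-c_len]
--     k1 = combi_x[-c_len:][:1]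
--     if not j:
--         return [i + k1]
--     return [i, j, k1]
--
--
-- def extraction_path(sentences):
--     result = []
--     for sentence in sentences:
--         buckets = {}
--         for no, combi in enumerate(sentence):
--             buckets.setdefault(combi[-1], []).append(no)
--         for x_no, combi_x in enumerate(sentence):
--             for y_no in buckets[combi_x[-1]]:
--                 if y_no <= x_no:
--                     continue
--                 result.append(_pair_path(combi_x, sentence[y_no]))
--     return result
-- ===== Notes on version B (the rewrite author's own statement) =====
-- stated objective: alternative
-- what changed: Replaces A's all-pairs scan with an equality guard by a per-sentence dict grouping indices by last path element, so each x only visits candidate partners from its bucket; the per-pair body is factored into a helper using a uniform k[:1] slice.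
-- outside the precondition, e.g. on extraction_path([[[]]]): A returns [], B raises IndexError
import Mathlib
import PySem

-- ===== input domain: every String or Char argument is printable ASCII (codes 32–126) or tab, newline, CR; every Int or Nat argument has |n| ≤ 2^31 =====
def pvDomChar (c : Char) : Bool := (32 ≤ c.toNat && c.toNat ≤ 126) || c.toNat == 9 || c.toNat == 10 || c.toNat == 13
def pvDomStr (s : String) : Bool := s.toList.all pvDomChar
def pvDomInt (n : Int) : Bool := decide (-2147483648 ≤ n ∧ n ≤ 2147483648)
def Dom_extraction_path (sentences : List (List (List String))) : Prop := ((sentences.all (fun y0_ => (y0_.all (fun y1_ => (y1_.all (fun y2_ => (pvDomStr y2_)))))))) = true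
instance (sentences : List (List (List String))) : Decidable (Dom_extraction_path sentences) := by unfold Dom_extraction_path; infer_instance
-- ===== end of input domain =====

-- B groups partner indices per last path element in a dict built once per sentence
-- (alternative decomposition, same outputs); Pre_ excludes empty dependency paths,
-- on which B's bucket construction raises IndexError.


-- ===== PORT A =====
-- literal transliteration of A's nested loops (enumerate × range with an equality guard)
def extraction_path (sentences : List (List (List String))) : List (List (List String)) :=
  sentences.foldl (fun result sentence =>
    (PySem.List.enumerate sentence 0).foldl (fun result xp =>
      (PySem.List.pyRange (xp.1 + 1) (sentence.length : Int) 1).foldl (fun result y_no =>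
        let combi_y := PySem.List.pyGetD sentence y_no []
        if PySem.List.pyGetD xp.2 (-1) "" == PySem.List.pyGetD combi_y (-1) "" then
          let c : PySem.Set String := PySem.Set.inter (PySem.Set.ofList xp.2) combi_y
          let k := PySem.List.slice xp.2 (some (-(c.length : Int))) (some (xp.2.length : Int))
          let i := PySem.List.slice xp.2 none (some (-(c.length : Int)))
          let j := PySem.List.slice combi_y none (some (-(c.length : Int)))
          if j.length == 0 then
            result ++ [[i ++ [PySem.List.pyGetD k 0 ""]]]
          else
            result ++ [[i, j, PySem.List.slice k none (some 1)]]
        else result) result) result) []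

-- ===== PORT B =====
-- B-side helper: the per-pair path (uniform k[:1] slice)
def pairPathB (combi_x combi_y : List String) : List (List String) :=
  let cLen : Int := ((PySem.Set.inter (PySem.Set.ofList combi_x) combi_y : PySem.Set String).length : Int)
  let i := PySem.List.slice combi_x none (some (-cLen))
  let j := PySem.List.slice combi_y none (some (-cLen))
  let k1 := PySem.List.slice (PySem.List.slice combi_x (some (-cLen)) none) none (some 1)
  if j = [] then [i ++ k1] else [i, j, k1]

-- B-side helper: dict of ascending index lists keyed by each path's last element
def buildBuckets (sentence : List (List String)) : PySem.Dict String (List Int) :=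
  (PySem.List.enumerate sentence 0).foldl
    (fun d p =>
      d.insert (PySem.List.pyGetD p.2 (-1) "")
        (d.getD (PySem.List.pyGetD p.2 (-1) "") [] ++ [p.1]))
    PySem.Dict.empty

def extraction_path_alt (sentences : List (List (List String))) : List (List (List String)) :=
  sentences.foldl (fun result sentence =>
    let buckets := buildBuckets sentence
    (PySem.List.enumerate sentence 0).foldl (fun result xp =>
      (buckets.getD (PySem.List.pyGetD xp.2 (-1) "") []).foldl (fun result y_no =>
        if y_no ≤ xp.1 then result
        else result ++ [pairPathB xp.2 (PySem.List.pyGetD sentence y_no [])]) result) result) []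

-- ===== PRECONDITION & SPEC =====
-- Pre_ excludes inputs containing an empty dependency path: B's bucket pass indexes
-- combi[-1] for every path, raising IndexError there, while A returns on the ones no
-- pair ever inspects (e.g. singleton sentences).
def Pre_extraction_path (sentences : List (List (List String))) : Prop :=
  ∀ sentence ∈ sentences, ∀ combi ∈ sentence, combi ≠ []
instance (sentences : List (List (List String))) : Decidable (Pre_extraction_path sentences) := by
  unfold Pre_extraction_path; infer_instance

def pvWitness_extraction_path : List (List (List String)) :=
  [[["a", "b"], ["c", "b"], ["b"]]]

def Spec_extraction_path (sentences : List (List (List String))) (out : List (List (List String))) : Prop := out = extraction_path_alt sentences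
instance (sentences : List (List (List String))) (out : List (List (List String))) : Decidable (Spec_extraction_path sentences out) := by unfold Spec_extraction_path; infer_instance

-- ===== CLAIM (what is proved, stated in full; the proofs are below) =====
def Claim_equal_extraction_path : Prop := ∀ (sentences : List (List (List String))), Dom_extraction_path sentences → Pre_extraction_path sentences → Spec_extraction_path sentences (extraction_path sentences)


-- ===== LEMMAS AND PROOFS =====

-- A's per-pair value as a function (proof-side restatement of A's inline lets)
def pathA (x y : List String) : List (List String) :=
  let c : PySem.Set String := PySem.Set.inter (PySem.Set.ofList x) y
  let k := PySem.List.slice x (some (-(c.length : Int))) (some (x.length : Int))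
  let i := PySem.List.slice x none (some (-(c.length : Int)))
  let j := PySem.List.slice y none (some (-(c.length : Int)))
  if j.length == 0 then [i ++ [PySem.List.pyGetD k 0 ""]]
  else [i, j, PySem.List.slice k none (some 1)]

-- xs[a : len(xs)] = xs[a:]
theorem slice_stop_len {a : Type} (xs : List a) (a? : Option Int) :
    PySem.List.slice xs a? (some (xs.length : Int)) = PySem.List.slice xs a? none := by
  have hc : PySem.List.clampIdx xs.length (xs.length : Int) = xs.length := by
    simp [PySem.List.clampIdx]
  simp only [PySem.List.slice, hc]

-- xs[-1] (total form) is an element of a nonempty xs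
theorem pyGetD_neg_one_mem {a : Type} (xs : List a) (d : a) (hx : xs ≠ []) :
    PySem.List.pyGetD xs (-1) d ∈ xs := by
  have hlen : 1 ≤ xs.length := List.length_pos_iff.mpr hx
  simp only [PySem.List.pyGetD, PySem.List.pyGet?, PySem.List.pyIdx?]
  norm_num [hlen]
  have h2 : xs.length - 1 < xs.length := by omega
  simp [List.getElem?_eq_getElem h2]

-- the generic grouping loop: getD after the bucket-building fold
theorem foldl_bucket_getD {a : Type} (keyOf : a -> String) (idxOf : a -> Int)
    (l : List a) (d : PySem.Dict String (List Int)) (k : String) :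
    (l.foldl (fun d p => d.insert (keyOf p) (d.getD (keyOf p) [] ++ [idxOf p])) d).getD k []
      = d.getD k [] ++ (l.filter (fun p => keyOf p == k)).map idxOf := by
  induction l generalizing d with
  | nil => simp
  | cons p t ih =>
    simp only [List.foldl_cons, List.filter_cons, ih]
    rw [PySem.Dict.getD_insert]
    by_cases hk : keyOf p == k
    · have : k = keyOf p := (beq_iff_eq.mp hk).symm
      simp [this]
    · have : ¬ (k = keyOf p) := fun h => hk (beq_iff_eq.mpr h.symm)
      simp [this, hk]

theorem buckets_getD (sentence : List (List String)) (key : String) :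
    (buildBuckets sentence).getD key []
      = ((PySem.List.enumerate sentence 0).filter
          (fun p => PySem.List.pyGetD p.2 (-1) "" == key)).map (fun p => p.1) := by
  unfold buildBuckets
  have h := foldl_bucket_getD (fun p : Int × List String => PySem.List.pyGetD p.2 (-1) "")
    (fun p => p.1) (PySem.List.enumerate sentence 0) PySem.Dict.empty key
  simp only at h
  exact h

theorem pairBody_eq (x y : List String) (hx : x ≠ []) (hy : y ≠ [])
    (h : PySem.List.pyGetD x (-1) "" = PySem.List.pyGetD y (-1) "") :
    pathA x y = pairPathB x y := by
  unfold pathA pairPathB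
  have hex : PySem.List.pyGetD x (-1) "" ∈ x := pyGetD_neg_one_mem x "" hx
  have hey : PySem.List.pyGetD x (-1) "" ∈ y := h ▸ pyGetD_neg_one_mem y "" hy
  have hc : PySem.List.pyGetD x (-1) "" ∈ PySem.Set.inter (PySem.Set.ofList x) y :=
    (PySem.Set.mem_inter _ _ _).mpr ⟨(PySem.Set.mem_ofList _ _).mpr hex, hey⟩
  have hcpos : 0 < (PySem.Set.inter (PySem.Set.ofList x) y : PySem.Set String).length :=
    List.length_pos_iff.mpr (List.ne_nil_of_mem hc)
  set cl := (PySem.Set.inter (PySem.Set.ofList x) y : PySem.Set String).length with hcl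
  dsimp only
  rw [slice_stop_len, PySem.List.slice_from_neg_natCast x cl hcpos]
  have hxpos : 0 < x.length := List.length_pos_iff.mpr hx
  have hkne : x.drop (x.length - cl) ≠ [] := by
    rw [ne_eq, List.drop_eq_nil_iff]
    omega
  obtain ⟨hd, tl, hk⟩ := List.exists_cons_of_ne_nil hkne
  rw [hk]
  have h1 : PySem.List.pyGetD (hd :: tl) 0 "" = hd := by
    simp
  have h2 : PySem.List.slice (hd :: tl) none (some 1) = [hd] := by
    have := PySem.List.slice_to (hd :: tl) (b := 1) (by norm_num)
    simpa using this
  rw [h1, h2, ← hcl]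
  by_cases hj : (PySem.List.slice y none (some (-(cl : Int)))) = []
  · simp [hj]
  · simp [hj, List.length_eq_zero_iff]


-- B's skip-loop over a bucket as a filtered append
theorem foldB_eq (l : List Int) (x : Int) (f : Int -> List (List String))
    (r : List (List (List String))) :
    l.foldl (fun r y => if y ≤ x then r else r ++ [f y]) r
      = r ++ (l.filter (fun y => decide (x < y))).map f := by
  rw [PySem.List.foldl_congr_mem' l _
      (fun r y => if decide (x < y) = true then r ++ [f y] else r) r ?_]
  · exact PySem.List.foldl_append_if _ f l r
  · intro y _ acc
    by_cases h : y ≤ x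
    · have h2 : ¬ x < y := not_lt.mpr h
      simp [h, h2]
    · have h2 : x < y := lt_of_not_ge h
      simp [h, h2]

-- the bucket's partner indices beyond x are exactly A's guarded range
theorem indices_eq (sentence : List (List String)) (x : Int) (kx : String)
    (h0 : 0 ≤ x) (hn : x < (sentence.length : Int)) :
    ((buildBuckets sentence).getD kx []).filter (fun y => decide (x < y))
      = (PySem.List.pyRange (x + 1) (sentence.length : Int) 1).filter
          (fun y => kx == PySem.List.pyGetD (PySem.List.pyGetD sentence y []) (-1) "") := by
  rw [buckets_getD, PySem.List.enumerate_eq_map_pyRange sentence []]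
  simp only [List.filter_map, List.filter_filter, List.map_map, Function.comp_def,
    PySem.List.len_eq]
  rw [PySem.List.pyRange_one_append 0 (x + 1) (sentence.length : Int) (by omega) (by omega),
    List.filter_append, List.map_append]
  have h1 : ∀ (p : Int → Bool),
      (PySem.List.pyRange 0 (x + 1)).filter (fun j => decide (x < j) && p j) = [] := by
    intro p
    rw [List.filter_eq_nil_iff]
    intro y hy
    have := PySem.List.mem_pyRange_one.mp hy
    simp only [Bool.and_eq_true, decide_eq_true_eq]
    omega
  rw [h1, List.map_nil, List.nil_append, List.map_id_fun']
  apply List.filter_congr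
  intro y hy
  have := PySem.List.mem_pyRange_one.mp hy
  have h2 : x < y := by omega
  simp [h2, eq_comm]

-- A's guarded range loop as a filtered append of pathA values
theorem foldA_eq (sentence : List (List String)) (x : Int) (cx : List String)
    (r : List (List (List String))) :
    (PySem.List.pyRange (x + 1) (sentence.length : Int) 1).foldl (fun result y_no =>
        let combi_y := PySem.List.pyGetD sentence y_no []
        if PySem.List.pyGetD cx (-1) "" == PySem.List.pyGetD combi_y (-1) "" then
          let c : PySem.Set String := PySem.Set.inter (PySem.Set.ofList cx) combi_y
          let k := PySem.List.slice cx (some (-(c.length : Int))) (some (cx.length : Int))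
          let i := PySem.List.slice cx none (some (-(c.length : Int)))
          let j := PySem.List.slice combi_y none (some (-(c.length : Int)))
          if j.length == 0 then
            result ++ [[i ++ [PySem.List.pyGetD k 0 ""]]]
          else
            result ++ [[i, j, PySem.List.slice k none (some 1)]]
        else result) r
      = r ++ ((PySem.List.pyRange (x + 1) (sentence.length : Int) 1).filter
          (fun y => PySem.List.pyGetD cx (-1) "" ==
            PySem.List.pyGetD (PySem.List.pyGetD sentence y []) (-1) "")).map
          (fun y => pathA cx (PySem.List.pyGetD sentence y [])) := by
  rw [PySem.List.foldl_congr_mem' _ _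
      (fun result y_no =>
        if PySem.List.pyGetD cx (-1) "" ==
            PySem.List.pyGetD (PySem.List.pyGetD sentence y_no []) (-1) "" then
          result ++ [pathA cx (PySem.List.pyGetD sentence y_no [])]
        else result) r ?_]
  · exact PySem.List.foldl_append_if _ _ _ r
  · intro y _ acc
    dsimp only [pathA]
    split_ifs <;> rfl

-- ===== VERDICT (by name: the statement is the Claim_ definition above) =====
theorem extraction_path_spec : Claim_equal_extraction_path := by
  intro sentences _ hpre
  unfold Spec_extraction_path extraction_path extraction_path_alt
  apply PySem.List.foldl_congr_mem'
  intro sentence hsent r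
  have hs : ∀ combi ∈ sentence, combi ≠ [] := hpre sentence hsent
  dsimp only
  apply PySem.List.foldl_congr_mem'
  intro xp hxp r
  obtain ⟨k, hk, hxpe⟩ := (PySem.List.mem_enumerate_iff sentence 0 xp).mp hxp
  have hx1 : xp.1 = (k : Int) := by rw [hxpe]; simp
  have hx2mem : xp.2 ∈ sentence := by rw [hxpe]; exact List.getElem_mem hk
  have hx2 : xp.2 ≠ [] := hs _ hx2mem
  rw [foldA_eq sentence xp.1 xp.2 r,
    foldB_eq _ xp.1 (fun y => pairPathB xp.2 (PySem.List.pyGetD sentence y [])) r,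
    indices_eq sentence xp.1 (PySem.List.pyGetD xp.2 (-1) "") (by omega) (by simp [hx1]; omega)]
  congr 1
  apply List.map_congr_left
  intro y hy
  obtain ⟨hyr, hyk⟩ := List.mem_filter.mp hy
  obtain ⟨hy1, hy2⟩ := PySem.List.mem_pyRange_one.mp hyr
  have hy0 : 0 ≤ y := by omega
  have hyt : y.toNat < sentence.length := by omega
  have hymem : PySem.List.pyGetD sentence y [] ∈ sentence := by
    rw [PySem.List.pyGetD_of_nonneg sentence [] hy0, List.getD_eq_getElem sentence [] hyt]
    exact List.getElem_mem hyt
  exact pairBody_eq xp.2 (PySem.List.pyGetD sentence y []) hx2 (hs _ hymem)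
    (beq_iff_eq.mp hyk)
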